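-- pv_equiv track=rewrite | github.com/vasanthsarathy/arglib | arglib/algorithms/basics.py | reachability_map
-- ===== SOURCE A (Python) =====
-- from collections import deque
-- from typing import Dict, Iterable, List, Sequence, Set, Tuple
--
-- def reachability_map(
--     nodes: Iterable[str],
--     edges: Iterable[Tuple[str, str]],
-- ) -> Dict[str, Set[str]]:
--     adjacency: Dict[str, Set[str]] = {node: set() for node in nodes}
--     for src, dst in edges:
--         adjacency.setdefault(src, set()).add(dst)
--         adjacency.setdefault(dst, set())
--
--     reachability: Dict[str, Set[str]] = {}
--     for start in adjacency:
--         visited: Set[str] = set()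
--         queue = deque([start])
--         while queue:
--             node = queue.popleft()
--             for neighbor in adjacency.get(node, set()):
--                 if neighbor not in visited:
--                     visited.add(neighbor)
--                     queue.append(neighbor)
--         reachability[start] = visited
--     return reachability
-- ===== SOURCE B (Python) =====
-- def reachability_map(nodes, edges):
--     # key order precomputed once: nodes, then edge endpoints, first occurrences
--     order = list(dict.fromkeys(list(nodes) + [x for e in edges for x in e]))
--     # group edges into duplicate-free successor lists (no setdefault, no sets)
--     succs = {}
--     for s, d in edges:
--         cur = succs.get(s, [])
--         if d not in cur:
--             succs[s] = cur + [d]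
--     # level-synchronous frontier expansion instead of a FIFO-queue BFS
--     result = {}
--     for start in order:
--         visited = set()
--         frontier = {start}
--         while frontier:
--             frontier = {d for c in frontier for d in succs.get(c, [])} - visited
--             visited |= frontier
--         result[start] = visited
--     return result
-- ===== Notes on version B (the rewrite author's own statement) =====
-- stated objective: alternative
-- what changed: A's dict-of-sets adjacency built via setdefault and a per-start FIFO-queue BFS are replaced by a precomputed dedup key order, edge grouping into duplicate-free successor lists, and level-synchronous frontier expansion (each round the whole next frontier is one successor comprehension minus the visited set) with no queue and no setdefault.
import Mathlib
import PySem

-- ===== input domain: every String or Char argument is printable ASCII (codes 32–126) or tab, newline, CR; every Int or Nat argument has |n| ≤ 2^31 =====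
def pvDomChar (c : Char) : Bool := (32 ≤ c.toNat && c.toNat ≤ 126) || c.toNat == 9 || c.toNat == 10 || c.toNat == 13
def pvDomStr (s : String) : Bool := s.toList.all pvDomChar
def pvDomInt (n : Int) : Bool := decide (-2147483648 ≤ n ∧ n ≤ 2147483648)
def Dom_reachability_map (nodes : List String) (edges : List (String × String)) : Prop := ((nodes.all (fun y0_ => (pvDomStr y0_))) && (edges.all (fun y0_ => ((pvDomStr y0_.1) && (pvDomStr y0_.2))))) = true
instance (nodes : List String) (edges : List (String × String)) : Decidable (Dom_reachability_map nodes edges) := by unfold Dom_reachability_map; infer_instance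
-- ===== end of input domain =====

-- B replaces the setdefault-built dict-of-sets adjacency and the per-start FIFO-queue BFS by a
-- precomputed dedup key order, duplicate-free successor lists grouped from the edges, and
-- level-synchronous frontier expansion; same results, alternative algorithmic structure.

-- ===== PORT A =====
-- 'adjacency = {node: set() for node in nodes}; for src, dst in edges:
--    adjacency.setdefault(src, set()).add(dst); adjacency.setdefault(dst, set())'
-- 'adjacency.setdefault(src, set()).add(dst)' = Dict.modify src ∅ (·.add dst); then 'setdefault(dst, set())'.
def pvAdjStep (d : PySem.Dict String (PySem.Set String)) (e : String × String) :
    PySem.Dict String (PySem.Set String) :=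
  PySem.Dict.setdefault (PySem.Dict.modify d e.1 PySem.Set.empty (fun s => PySem.Set.add s e.2))
    e.2 PySem.Set.empty

def pvAdj (nodes : List String) (edges : List (String × String)) :
    PySem.Dict String (PySem.Set String) :=
  edges.foldl pvAdjStep
    (nodes.foldl (fun d n => d.insert n PySem.Set.empty) PySem.Dict.empty)

-- 'while queue: node = queue.popleft(); for neighbor in adjacency.get(node, set()): …'
-- (fuel makes the recursion total; it is provably sufficient, see pvLoop_eq below)
def pvLoopA (adj : PySem.Dict String (PySem.Set String)) :
    Nat → PySem.Set String → List String → PySem.Set String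
  | 0, visited, _ => visited
  | _ + 1, visited, [] => visited
  | fuel + 1, visited, node :: rest =>
    let s := (PySem.Dict.getD adj node PySem.Set.empty).foldl
      (fun (acc : PySem.Set String × List String) nb =>
        if PySem.Set.contains acc.1 nb then acc else (PySem.Set.add acc.1 nb, acc.2 ++ [nb]))
      (visited, rest)
    pvLoopA adj fuel s.1 s.2

def reachability_map (nodes : List String) (edges : List (String × String)) :
    List (String × List String) :=
  let adj := pvAdj nodes edges
  adj.items.map (fun p => (p.1, pvLoopA adj (2 * adj.items.length + 1) PySem.Set.empty [p.1]))

-- ===== PORT B =====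
-- 'for s, d in edges: cur = succs.get(s, []); if d not in cur: succs[s] = cur + [d]'
def pvSuccs (edges : List (String × String)) : PySem.Dict String (List String) :=
  edges.foldl
    (fun d e =>
      let cur := PySem.Dict.getD d e.1 []
      d.insert e.1 (if e.2 ∈ cur then cur else cur ++ [e.2]))
    PySem.Dict.empty

-- 'while frontier: frontier = {d for c in frontier for d in succs.get(c, [])} - visited; visited |= frontier'
def pvLoopB (succs : PySem.Dict String (List String)) :
    Nat → PySem.Set String → PySem.Set String → PySem.Set String
  | 0, visited, _ => visited
  | _ + 1, visited, [] => visited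
  | fuel + 1, visited, frontier =>
    let nf := PySem.Set.diff
      (PySem.Set.ofList (frontier.flatMap (fun c => PySem.Dict.getD succs c [])))
      visited
    pvLoopB succs fuel (PySem.Set.union visited nf) nf

-- 'order = list(dict.fromkeys(list(nodes) + [x for e in edges for x in e]))' = PySem.List.dedup
def reachability_map_alt (nodes : List String) (edges : List (String × String)) :
    List (String × List String) :=
  let order := PySem.List.dedup (nodes ++ edges.flatMap (fun e => [e.1, e.2]))
  let succs := pvSuccs edges
  order.map (fun n =>
    (n, pvLoopB succs (order.length + 2) PySem.Set.empty (PySem.Set.ofList [n])))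

-- ===== PRECONDITION & SPEC =====
def Spec_reachability_map (nodes : List String) (edges : List (String × String)) (out : List (String × List String)) : Prop := out = reachability_map_alt nodes edges
instance (nodes : List String) (edges : List (String × String)) (out : List (String × List String)) : Decidable (Spec_reachability_map nodes edges out) := by unfold Spec_reachability_map; infer_instance

-- ===== CLAIM (what is proved, stated in full; the proofs are below) =====
def Claim_equal_reachability_map : Prop := ∀ (nodes : List String) (edges : List (String × String)), Dom_reachability_map nodes edges → Spec_reachability_map nodes edges (reachability_map nodes edges)

-- ===== LEMMAS AND PROOFS =====

-- the new (previously unseen) elements of xs, in first-occurrence order, seen-set v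
def pvFresh : List String → List String → List String
  | _, [] => []
  | v, x :: xs => if x ∈ v then pvFresh v xs else x :: pvFresh (v ++ [x]) xs

lemma pvFresh_congr (v w xs : List String) (h : ∀ y, y ∈ v ↔ y ∈ w) :
    pvFresh v xs = pvFresh w xs := by
  induction xs generalizing v w with
  | nil => rfl
  | cons x xs ih =>
    by_cases hx : x ∈ v
    · simp [pvFresh, hx, (h x).mp hx]
      exact ih v w h
    · have hx' : x ∉ w := fun hw => hx ((h x).mpr hw)
      simp [pvFresh, hx, hx']
      exact ih (v ++ [x]) (w ++ [x]) (by intro y; simp [h y])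

lemma pvFresh_append (v xs ys : List String) :
    pvFresh v (xs ++ ys) = pvFresh v xs ++ pvFresh (v ++ pvFresh v xs) ys := by
  induction xs generalizing v with
  | nil => simp [pvFresh]
  | cons x xs ih =>
    by_cases hx : x ∈ v
    · simp [pvFresh, hx, ih]
    · simp only [List.cons_append, pvFresh, if_neg hx, ih (v ++ [x]), List.cons_append,
        List.append_assoc, List.nil_append]

lemma mem_pvFresh (v xs : List String) (y : String) (h : y ∈ pvFresh v xs) :
    y ∈ xs ∧ y ∉ v := by
  induction xs generalizing v with
  | nil => simp [pvFresh] at h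
  | cons x xs ih =>
    by_cases hx : x ∈ v
    · rw [pvFresh, if_pos hx] at h
      have := ih v h
      exact ⟨List.mem_cons_of_mem _ this.1, this.2⟩
    · rw [pvFresh, if_neg hx] at h
      rcases List.mem_cons.mp h with rfl | h'
      · exact ⟨List.mem_cons_self, hx⟩
      · have := ih (v ++ [x]) h'
        refine ⟨List.mem_cons_of_mem _ this.1, fun hv => this.2 ?_⟩
        simp [hv]

lemma nodup_append_pvFresh (v xs : List String) (hv : v.Nodup) :
    (v ++ pvFresh v xs).Nodup := by
  induction xs generalizing v with
  | nil => simpa [pvFresh]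
  | cons x xs ih =>
    by_cases hx : x ∈ v
    · rw [pvFresh, if_pos hx]; exact ih v hv
    · rw [pvFresh, if_neg hx]
      have : v ++ x :: pvFresh (v ++ [x]) xs = (v ++ [x]) ++ pvFresh (v ++ [x]) xs := by simp
      rw [this]
      refine ih (v ++ [x]) (hv.append (List.nodup_singleton x) ?_)
      intro a ha hb
      rw [List.mem_singleton] at hb
      exact hx (hb ▸ ha)

-- the inner 'for neighbor …' loop of A
lemma pvFoldStep (ns v q : List String) :
    ns.foldl (fun (acc : PySem.Set String × List String) nb =>
        if PySem.Set.contains acc.1 nb then acc else (PySem.Set.add acc.1 nb, acc.2 ++ [nb]))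
      (v, q) = (v ++ pvFresh v ns, q ++ pvFresh v ns) := by
  induction ns generalizing v q with
  | nil => simp [pvFresh]
  | cons x ns ih =>
    rw [List.foldl_cons]
    by_cases hx : x ∈ v
    · have hc : PySem.Set.contains v x = true := (PySem.Set.contains_iff _ _).mpr hx
      simp only [hc, if_true, ih, pvFresh, if_pos hx]
    · have hc : PySem.Set.contains v x = false := by
        rw [Bool.eq_false_iff]; intro h; exact hx ((PySem.Set.contains_iff _ _).mp h)
      simp only [hc, Bool.false_eq_true, if_false, PySem.Set.add_of_not_mem hx, ih,
        pvFresh, if_neg hx, List.append_assoc, List.cons_append, List.nil_append]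

lemma pvDiff_ofList (xs v : List String) :
    PySem.Set.diff (PySem.Set.ofList xs) v = pvFresh v xs := by
  have aux : ∀ (xs s v : List String),
      PySem.Set.diff (xs.foldl PySem.Set.add s) v =
        PySem.Set.diff s v ++ pvFresh (v ++ s) xs := by
    intro xs
    induction xs with
    | nil => intro s v; simp [pvFresh]
    | cons x xs ih =>
      intro s v
      rw [List.foldl_cons]
      by_cases hx : x ∈ s
      · rw [PySem.Set.add_of_mem hx, ih s v, pvFresh,
          if_pos (List.mem_append.mpr (Or.inr hx))]
      · rw [PySem.Set.add_of_not_mem hx, ih (s ++ [x]) v]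
        by_cases hv : x ∈ v
        · have h1 : PySem.Set.diff (s ++ [x]) v = PySem.Set.diff s v := by
            simp [PySem.Set.diff, List.filter_append, hv]
          have h2 : pvFresh (v ++ (s ++ [x])) xs = pvFresh (v ++ s) xs := by
            apply pvFresh_congr
            intro y
            constructor
            · intro hy
              rcases List.mem_append.mp hy with hy | hy
              · exact List.mem_append.mpr (Or.inl hy)
              · rcases List.mem_append.mp hy with hy | hy
                · exact List.mem_append.mpr (Or.inr hy)
                · rw [List.mem_singleton] at hy
                  exact List.mem_append.mpr (Or.inl (hy ▸ hv))
            · intro hy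
              rcases List.mem_append.mp hy with hy | hy
              · exact List.mem_append.mpr (Or.inl hy)
              · exact List.mem_append.mpr (Or.inr (List.mem_append.mpr (Or.inl hy)))
          rw [h1, h2, pvFresh, if_pos (List.mem_append.mpr (Or.inl hv))]
        · have hxvs : x ∉ v ++ s := by
            intro h; rcases List.mem_append.mp h with h | h
            · exact hv h
            · exact hx h
          have h1 : PySem.Set.diff (s ++ [x]) v = PySem.Set.diff s v ++ [x] := by
            simp [PySem.Set.diff, List.filter_append, hv]
          rw [h1, pvFresh, if_neg hxvs, List.append_assoc]
          simp [List.append_assoc]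
  have h0 : PySem.Set.diff (PySem.Set.empty : PySem.Set String) v = [] := rfl
  calc PySem.Set.diff (PySem.Set.ofList xs) v
      = PySem.Set.diff (xs.foldl PySem.Set.add PySem.Set.empty) v := rfl
    _ = PySem.Set.diff (PySem.Set.empty : PySem.Set String) v ++ pvFresh (v ++ PySem.Set.empty) xs := aux xs _ v
    _ = pvFresh v xs := by
        rw [h0, List.nil_append]
        exact pvFresh_congr _ _ _ (by intro y; simp [PySem.Set.empty])

lemma pvLoopA_nil (adj : PySem.Dict String (PySem.Set String)) (fa : Nat) (v : PySem.Set String) :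
    pvLoopA adj fa v [] = v := by
  cases fa <;> rfl

lemma pvLoopB_nil (succs : PySem.Dict String (List String)) (fb : Nat) (v : PySem.Set String) :
    pvLoopB succs fb v [] = v := by
  cases fb <;> rfl

-- A's queue loop processes a whole level at a time
lemma pvLoopA_level (adj : PySem.Dict String (PySem.Set String)) (l : List String) :
    ∀ (d v : List String) (fa : Nat),
    pvLoopA adj (fa + l.length) v (l ++ d) =
      pvLoopA adj fa (v ++ pvFresh v (l.flatMap (fun c => PySem.Dict.getD adj c PySem.Set.empty)))
        (d ++ pvFresh v (l.flatMap (fun c => PySem.Dict.getD adj c PySem.Set.empty))) := by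
  induction l with
  | nil => intro d v fa; simp [pvFresh]
  | cons n l ih =>
    intro d v fa
    have hlen : fa + (n :: l).length = (fa + l.length) + 1 := by
      simp [List.length_cons]; omega
    rw [hlen, List.cons_append, pvLoopA, pvFoldStep]
    simp only [List.append_assoc]
    rw [ih (d ++ pvFresh v (PySem.Dict.getD adj n PySem.Set.empty)) (v ++ pvFresh v (PySem.Dict.getD adj n PySem.Set.empty)) fa]
    rw [List.flatMap_cons, pvFresh_append]
    simp [List.append_assoc]

lemma pvGetD_pvAdjStep (d : PySem.Dict String (PySem.Set String)) (e : String × String) (c : String) :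
    PySem.Dict.getD (pvAdjStep d e) c PySem.Set.empty =
      if c = e.1 then PySem.Set.add (PySem.Dict.getD d e.1 PySem.Set.empty) e.2
      else PySem.Dict.getD d c PySem.Set.empty := by
  unfold pvAdjStep
  have hsd : ∀ (d1 : PySem.Dict String (PySem.Set String)),
      PySem.Dict.getD (PySem.Dict.setdefault d1 e.2 PySem.Set.empty) c PySem.Set.empty =
        PySem.Dict.getD d1 c PySem.Set.empty := by
    intro d1
    by_cases hc2 : c = e.2
    · rw [hc2]; exact PySem.Dict.getD_setdefault_self d1 e.2 _ _
    · rw [PySem.Dict.getD_eq_get?_getD, PySem.Dict.get?_setdefault_of_ne d1 _ hc2,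
        ← PySem.Dict.getD_eq_get?_getD]
  rw [hsd, PySem.Dict.getD_modify]

lemma pvContains_pvAdjStep (d : PySem.Dict String (PySem.Set String)) (e : String × String) (x : String) :
    (pvAdjStep d e).contains x = (x == e.2 || (x == e.1 || d.contains x)) := by
  unfold pvAdjStep
  rw [PySem.Dict.contains_setdefault, PySem.Dict.contains_modify]

-- the base dict '{node: set() for node in nodes}' maps every key to the empty set
lemma pvBase_getD (ns : List String) (d : PySem.Dict String (PySem.Set String))
    (h : ∀ c, PySem.Dict.getD d c PySem.Set.empty = PySem.Set.empty) (c : String) :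
    PySem.Dict.getD (ns.foldl (fun d n => d.insert n PySem.Set.empty) d) c PySem.Set.empty
      = PySem.Set.empty := by
  induction ns generalizing d with
  | nil => exact h c
  | cons n ns ih =>
    rw [List.foldl_cons]
    refine ih _ (fun c' => ?_)
    rw [PySem.Dict.getD_insert]
    split <;> [rfl; exact h c']

lemma pvAdj_closed (nodes : List String) (edges : List (String × String)) :
    ∀ c x, x ∈ PySem.Dict.getD (pvAdj nodes edges) c PySem.Set.empty →
      x ∈ (pvAdj nodes edges).keys := by
  have inv : ∀ (es : List (String × String)) (d : PySem.Dict String (PySem.Set String)),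
      (∀ c x, x ∈ PySem.Dict.getD d c PySem.Set.empty → d.contains x = true) →
      ∀ c x, x ∈ PySem.Dict.getD (es.foldl pvAdjStep d) c PySem.Set.empty →
        (es.foldl pvAdjStep d).contains x = true := by
    intro es
    induction es with
    | nil => intro d h; exact h
    | cons e es ih =>
      intro d h
      rw [List.foldl_cons]
      refine ih _ (fun c x hx => ?_)
      rw [pvContains_pvAdjStep]
      rw [pvGetD_pvAdjStep] at hx
      by_cases hc : c = e.1
      · rw [if_pos hc] at hx
        rcases (PySem.Set.mem_add _ _ _).mp hx with hx | rfl
        · simp [h e.1 x hx]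
        · simp
      · rw [if_neg hc] at hx
        simp [h c x hx]
  intro c x hx
  rw [← PySem.Dict.contains_iff_mem_keys]
  refine inv edges _ (fun c' x' hx' => ?_) c x hx
  rw [pvBase_getD nodes PySem.Dict.empty (fun c'' => by rw [PySem.Dict.getD_empty]) c'] at hx'
  cases hx'

-- A's adjacency values coincide with B's grouped successor lists
lemma pvGetD_eq_succs (nodes : List String) (edges : List (String × String)) (c : String) :
    PySem.Dict.getD (pvAdj nodes edges) c PySem.Set.empty =
      PySem.Dict.getD (pvSuccs edges) c [] := by
  have aux : ∀ (es : List (String × String)) (dA : PySem.Dict String (PySem.Set String))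
      (dB : PySem.Dict String (List String)),
      (∀ c, PySem.Dict.getD dA c PySem.Set.empty = PySem.Dict.getD dB c []) →
      ∀ c, PySem.Dict.getD (es.foldl pvAdjStep dA) c PySem.Set.empty =
        PySem.Dict.getD (es.foldl
          (fun d e =>
            let cur := PySem.Dict.getD d e.1 []
            d.insert e.1 (if e.2 ∈ cur then cur else cur ++ [e.2])) dB) c [] := by
    intro es
    induction es with
    | nil => intro dA dB h; exact h
    | cons e es ih =>
      intro dA dB h c
      rw [List.foldl_cons, List.foldl_cons]
      refine ih _ _ (fun c' => ?_) c
      rw [pvGetD_pvAdjStep]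
      show _ = PySem.Dict.getD (dB.insert e.1 _) c' []
      rw [PySem.Dict.getD_insert]
      by_cases hc : c' = e.1
      · rw [if_pos hc, if_pos hc, PySem.Set.add_eq_ite, h e.1]
      · rw [if_neg hc, if_neg hc, h c']
  exact aux edges _ _ (fun c' => by
    rw [pvBase_getD nodes PySem.Dict.empty (fun c'' => by rw [PySem.Dict.getD_empty]) c',
      PySem.Dict.getD_empty]; rfl) c

-- keys after one insert are Set.add of the old keys
lemma pvKeys_insert {ν : Type} (d : PySem.Dict String ν) (k : String) (v : ν) :
    (d.insert k v).keys = PySem.Set.add d.keys k := by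
  rw [PySem.Set.add_eq_ite]
  by_cases hk : k ∈ d.keys
  · rw [if_pos hk]
    exact PySem.Dict.keys_insert_of_contains _ _ ((PySem.Dict.contains_iff_mem_keys _ _).mpr hk)
  · rw [if_neg hk]
    refine PySem.Dict.keys_insert_of_not_contains _ _ ?_
    rw [Bool.eq_false_iff]
    intro hcon
    exact hk ((PySem.Dict.contains_iff_mem_keys _ _).mp hcon)

lemma pvKeys_pvAdjStep (d : PySem.Dict String (PySem.Set String)) (e : String × String) :
    (pvAdjStep d e).keys = PySem.Set.add (PySem.Set.add d.keys e.1) e.2 := by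
  unfold pvAdjStep
  rw [PySem.Dict.keys_setdefault, PySem.Dict.keys_modify, pvKeys_insert]
  rw [PySem.Dict.contains_modify, PySem.Set.add_eq_ite (PySem.Set.add d.keys e.1) e.2]
  by_cases h2 : (PySem.Set.add d.keys e.1).contains e.2 = true
  · have hmem : e.2 ∈ PySem.Set.add d.keys e.1 := (PySem.Set.contains_iff _ _).mp h2
    have : (e.2 == e.1 || d.contains e.2) = true := by
      rcases (PySem.Set.mem_add _ _ _).mp hmem with hx | hq
      · simp [(PySem.Dict.contains_iff_mem_keys _ _).mpr hx]
      · simp [hq]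
    rw [this, if_pos hmem]; simp
  · have hmem : e.2 ∉ PySem.Set.add d.keys e.1 := fun hm =>
      h2 ((PySem.Set.contains_iff _ _).mpr hm)
    have : (e.2 == e.1 || d.contains e.2) = false := by
      rw [Bool.or_eq_false_iff]
      constructor
      · rw [beq_eq_false_iff_ne]
        intro hq; exact hmem ((PySem.Set.mem_add _ _ _).mpr (Or.inr hq))
      · rw [Bool.eq_false_iff]
        intro hcon
        exact hmem ((PySem.Set.mem_add _ _ _).mpr
          (Or.inl ((PySem.Dict.contains_iff_mem_keys _ _).mp hcon)))
    rw [this, if_neg hmem]; simp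

-- A's key order is exactly B's precomputed dedup order
lemma pvKeys_pvAdj (nodes : List String) (edges : List (String × String)) :
    (pvAdj nodes edges).keys =
      PySem.List.dedup (nodes ++ edges.flatMap (fun e => [e.1, e.2])) := by
  have aux : ∀ (es : List (String × String)) (d : PySem.Dict String (PySem.Set String)),
      (es.foldl pvAdjStep d).keys =
        PySem.Set.update d.keys (es.flatMap (fun e => [e.1, e.2])) := by
    intro es
    induction es with
    | nil => intro d; simp [PySem.Set.update]
    | cons e es ih =>
      intro d
      rw [List.foldl_cons, ih, pvKeys_pvAdjStep, List.flatMap_cons]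
      show _ = PySem.Set.update d.keys (e.1 :: e.2 :: es.flatMap (fun e => [e.1, e.2]))
      rw [PySem.Set.update_cons, PySem.Set.update_cons]
  unfold pvAdj
  rw [aux, PySem.Dict.keys_foldl_insert, PySem.Dict.keys_empty,
    PySem.Set.update_nil_left, ← PySem.Set.ofList_append, PySem.List.dedup_eq_ofList]

-- number of keys not yet visited
def pvCnt (adj : PySem.Dict String (PySem.Set String)) (v : List String) : Nat :=
  (adj.keys.toFinset \ v.toFinset).card

-- the two loops agree whenever both fuels dominate the decreasing measure
lemma pvLoop_eq (adj : PySem.Dict String (PySem.Set String))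
    (succs : PySem.Dict String (List String))
    (heq : ∀ c, PySem.Dict.getD adj c PySem.Set.empty = PySem.Dict.getD succs c [])
    (hC : ∀ c x, x ∈ PySem.Dict.getD adj c PySem.Set.empty → x ∈ adj.keys) :
    ∀ (fb fa : Nat) (v f : List String), v.Nodup →
      2 * pvCnt adj v + f.length ≤ fa → pvCnt adj v + 1 ≤ fb →
      pvLoopA adj fa v f = pvLoopB succs fb v f := by
  intro fb
  induction fb with
  | zero => intro fa v f hv hfa hfb; omega
  | succ fb ih =>
    intro fa v f hv hfa hfb
    cases f with
    | nil => rw [pvLoopA_nil, pvLoopB_nil]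
    | cons hd tl =>
      set m := pvFresh v ((hd :: tl).flatMap (fun c => PySem.Dict.getD adj c PySem.Set.empty)) with hm
      have hnd := nodup_append_pvFresh v ((hd :: tl).flatMap (fun c => PySem.Dict.getD adj c PySem.Set.empty)) hv
      rw [← hm] at hnd
      have mnodup : m.Nodup := (List.nodup_append.mp hnd).2.1
      have mdisj : ∀ x ∈ m, x ∉ v := fun x hx => (mem_pvFresh _ _ _ hx).2
      have hlen : (hd :: tl).length ≤ fa := by omega
      have hA := pvLoopA_level adj (hd :: tl) [] v (fa - (hd :: tl).length)
      rw [List.append_nil, List.nil_append, Nat.sub_add_cancel hlen, ← hm] at hA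
      have hUnion : PySem.Set.union v m = v ++ m :=
        PySem.Set.update_eq_append_of_disjoint v m mnodup mdisj
      have hB : pvLoopB succs (fb + 1) v (hd :: tl) = pvLoopB succs fb (v ++ m) m := by
        rw [pvLoopB]
        simp only [← heq]
        rw [pvDiff_ofList, ← hm, hUnion]
        simp
      rw [hA, hB]
      by_cases hm0 : m = []
      · rw [hm0, pvLoopA_nil, pvLoopB_nil]
      · have hsubF : m.toFinset ⊆ adj.keys.toFinset \ v.toFinset := by
          intro y hy
          rw [List.mem_toFinset] at hy
          have h1 := mem_pvFresh _ _ _ (hm ▸ hy)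
          obtain ⟨c, _, hyc⟩ := List.mem_flatMap.mp h1.1
          rw [Finset.mem_sdiff, List.mem_toFinset, List.mem_toFinset]
          exact ⟨hC c y hyc, h1.2⟩
        have hcnt : pvCnt adj (v ++ m) = pvCnt adj v - m.length := by
          unfold pvCnt
          rw [List.toFinset_append]
          have hsplit : adj.keys.toFinset \ (v.toFinset ∪ m.toFinset) =
              (adj.keys.toFinset \ v.toFinset) \ m.toFinset := by
            ext y; simp [Finset.mem_sdiff]; tauto
          rw [hsplit, Finset.card_sdiff, Finset.inter_eq_left.mpr hsubF,
            List.toFinset_card_of_nodup mnodup]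
        have hmlen : m.length ≤ pvCnt adj v := by
          calc m.length = m.toFinset.card := (List.toFinset_card_of_nodup mnodup).symm
            _ ≤ _ := Finset.card_le_card hsubF
        have hm1 : 1 ≤ m.length := List.length_pos_iff.mpr hm0
        refine ih (fa - (hd :: tl).length) (v ++ m) m hnd ?_ ?_
        · rw [hcnt]; omega
        · rw [hcnt]; omega

-- ===== VERDICT (by name: the statement is the Claim_ definition above) =====
theorem reachability_map_spec : Claim_equal_reachability_map := by
  intro nodes edges _
  unfold Spec_reachability_map reachability_map reachability_map_alt
  rw [← pvKeys_pvAdj nodes edges]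
  have hitems : (pvAdj nodes edges).items.map
      (fun p => (p.1, pvLoopA (pvAdj nodes edges)
        (2 * (pvAdj nodes edges).items.length + 1) PySem.Set.empty [p.1])) =
      (pvAdj nodes edges).keys.map
      (fun k => (k, pvLoopA (pvAdj nodes edges)
        (2 * (pvAdj nodes edges).items.length + 1) PySem.Set.empty [k])) := by
    simp only [PySem.Dict.keys, List.map_map]
    rfl
  rw [hitems]
  refine List.map_congr_left (fun k _ => ?_)
  refine congrArg (Prod.mk k) ?_
  have hone : (PySem.Set.ofList [k] : PySem.Set String) = [k] := rfl
  rw [hone]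
  have hkl : (pvAdj nodes edges).keys.length = (pvAdj nodes edges).items.length := by
    simp [PySem.Dict.keys]
  have hcnt0 : pvCnt (pvAdj nodes edges) PySem.Set.empty ≤ (pvAdj nodes edges).items.length := by
    unfold pvCnt
    calc ((pvAdj nodes edges).keys.toFinset \ (PySem.Set.empty : PySem.Set String).toFinset).card
        ≤ (pvAdj nodes edges).keys.toFinset.card := Finset.card_le_card (Finset.sdiff_subset)
      _ ≤ (pvAdj nodes edges).keys.length := List.toFinset_card_le _
      _ = (pvAdj nodes edges).items.length := hkl
  rw [hkl]
  exact pvLoop_eq (pvAdj nodes edges) (pvSuccs edges) (pvGetD_eq_succs nodes edges)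
    (pvAdj_closed nodes edges)
    ((pvAdj nodes edges).items.length + 2) (2 * (pvAdj nodes edges).items.length + 1)
    PySem.Set.empty [k] List.nodup_nil
    (by simp only [List.length_cons, List.length_nil]; omega) (by omega)
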